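-- pv_equiv track=rewrite | github.com/Gaurav306193/Python-Problems | find_string_alphabets.py | find_first_and_last_occurrence_with_alphabets
-- ===== SOURCE A (Python) =====
-- def find_first_and_last_occurrence_with_alphabets(s, ch):
--     first_occurrence = s.find(ch)
--     last_occurrence = s.rfind(ch)
--     occurred_alphabets = {}
--     for i in range(len(s)):
--         if s[i] == ch:
--             occurred_alphabets[s[i]] = [first_occurrence, last_occurrence]
--     return occurred_alphabets
-- ===== SOURCE B (Python) =====
-- def find_first_and_last_occurrence_with_alphabets(s, ch):
--     first = None
--     last = None
--     for i, c in enumerate(s):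
--         if c == ch:
--             if first is None:
--                 first = i
--             last = i
--     if first is None:
--         return {}
--     return {ch: [first, last]}
-- ===== Notes on version B (the rewrite author's own statement) =====
-- stated objective: simpler
-- what changed: Replaces the two library scans (find/rfind) plus a dict-populating index loop by a single enumerate pass that tracks the first and last matching index directly.
import Mathlib
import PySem

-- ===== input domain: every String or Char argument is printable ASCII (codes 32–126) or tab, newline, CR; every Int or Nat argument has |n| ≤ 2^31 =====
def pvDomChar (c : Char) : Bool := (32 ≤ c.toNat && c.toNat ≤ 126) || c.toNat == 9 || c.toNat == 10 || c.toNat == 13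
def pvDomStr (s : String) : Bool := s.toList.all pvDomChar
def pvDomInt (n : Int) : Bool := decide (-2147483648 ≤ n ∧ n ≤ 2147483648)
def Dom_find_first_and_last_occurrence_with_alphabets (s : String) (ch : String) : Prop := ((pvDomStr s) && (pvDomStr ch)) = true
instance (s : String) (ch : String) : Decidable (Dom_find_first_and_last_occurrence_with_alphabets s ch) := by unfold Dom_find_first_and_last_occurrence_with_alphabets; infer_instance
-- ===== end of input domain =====

-- B replaces A's two library scans (find/rfind) plus a dict-populating index loop by one
-- enumerate pass tracking the first and last matching index (objective: simpler).

-- ===== PORT A =====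
def find_first_and_last_occurrence_with_alphabets (s : String) (ch : String) : List (String × List Int) :=
  let first_occurrence := PySem.Str.find s ch
  let last_occurrence := PySem.Str.rfind s ch
  let occurred_alphabets : PySem.Dict String (List Int) :=
    (PySem.List.pyRange 0 (PySem.Str.len s) 1).foldl
      (fun d i =>
        match PySem.Str.pyGet? s i with
        | some c =>
            if String.ofList [c] == ch then
              d.insert (String.ofList [c]) [first_occurrence, last_occurrence]
            else d
        | none => d)
      PySem.Dict.empty
  occurred_alphabets.items

-- ===== PORT B =====
def find_first_and_last_occurrence_with_alphabets_alt (s : String) (ch : String) : List (String × List Int) :=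
  let st := (PySem.List.enumerate s.toList 0).foldl
    (fun st ic =>
      if String.ofList [ic.2] == ch then
        ((match st.1 with | none => some ic.1 | some f => some f), some ic.1)
      else st)
    ((none : Option Int), (none : Option Int))
  match st.1, st.2 with
  | some f, some l => [(ch, [f, l])]
  | _, _ => []

-- ===== PRECONDITION & SPEC =====
def Spec_find_first_and_last_occurrence_with_alphabets (s : String) (ch : String) (out : List (String × List Int)) : Prop := out = find_first_and_last_occurrence_with_alphabets_alt s ch
instance (s : String) (ch : String) (out : List (String × List Int)) : Decidable (Spec_find_first_and_last_occurrence_with_alphabets s ch out) := by unfold Spec_find_first_and_last_occurrence_with_alphabets; infer_instance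

-- ===== CLAIM (what is proved, stated in full; the proofs are below) =====
def Claim_equal_find_first_and_last_occurrence_with_alphabets : Prop := ∀ (s : String) (ch : String), Dom_find_first_and_last_occurrence_with_alphabets s ch → Spec_find_first_and_last_occurrence_with_alphabets s ch (find_first_and_last_occurrence_with_alphabets s ch)

-- ===== LEMMAS AND PROOFS =====

-- [c] is a prefix of t iff t starts with c
theorem pv_singleton_prefix_iff (c : Char) (t : List Char) : [c] <+: t ↔ t.head? = some c := by
  simp only [List.cons_prefix_iff]
  constructor
  · rintro ⟨l, rfl, -⟩; rfl
  · intro h; cases t <;> simp_all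

theorem pv_singleton_prefix_drop (c : Char) (cs : List Char) (j : Nat) :
    [c] <+: cs.drop j ↔ cs[j]? = some c := by
  rw [pv_singleton_prefix_iff, List.head?_drop]

-- the A/B gate, when ch is the one-character string of c0, is equality with c0
theorem pv_gate_iff (ch : String) (c0 c : Char) (hch : ch.toList = [c0]) :
    (String.ofList [c] == ch) = (c == c0) := by
  have hch' : ch = String.ofList [c0] := by rw [← hch]; simp
  subst hch'
  by_cases h : c = c0
  · subst h; simp
  · have : String.ofList [c] ≠ String.ofList [c0] := by
      intro he
      have := congrArg String.toList he
      simp at this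
      exact h this
    simp [h, this]

-- Chars.find on a singleton pattern returns the least index holding c0
theorem pv_find_singleton (cs : List Char) (c0 : Char) (h : c0 ∈ cs) :
    ∃ f : Nat, PySem.Chars.find cs [c0] = (f : Int) ∧ cs[f]? = some c0 ∧
      ∀ j < f, cs[j]? ≠ some c0 := by
  obtain ⟨j, hj⟩ := List.mem_iff_getElem?.mp h
  have hinfix : [c0] <:+: cs := by
    rw [← PySem.Chars.isIn_iff_infix, ← PySem.Chars.exists_prefix_drop_iff_isIn]
    exact ⟨j, (pv_singleton_prefix_drop c0 cs j).mpr hj⟩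
  have hnn : 0 ≤ PySem.Chars.find cs [c0] := (PySem.Chars.find_nonneg_iff cs [c0]).mpr hinfix
  obtain ⟨hpre, hmin⟩ := PySem.Chars.find_spec hnn
  refine ⟨(PySem.Chars.find cs [c0]).toNat, by omega, (pv_singleton_prefix_drop _ _ _).mp hpre, ?_⟩
  intro i hi hget
  exact hmin i hi ((pv_singleton_prefix_drop c0 cs i).mpr hget)

-- rfind.go on a singleton pattern: -1 with nothing ≤ n, or the greatest index ≤ n
theorem pv_rgo_spec (cs : List Char) (c0 : Char) (n : Nat) :
    (PySem.Chars.rfind.go cs [c0] n = -1 ∧ ∀ j ≤ n, cs[j]? ≠ some c0) ∨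
    (∃ l : Nat, PySem.Chars.rfind.go cs [c0] n = (l : Int) ∧ l ≤ n ∧ cs[l]? = some c0 ∧
      ∀ j, l < j → j ≤ n → cs[j]? ≠ some c0) := by
  induction n with
  | zero =>
      rw [PySem.Chars.rfind.go]
      by_cases h : [c0].isPrefixOf cs
      · right
        refine ⟨0, by simp [h], le_refl 0, ?_, by omega⟩
        have := (pv_singleton_prefix_drop c0 cs 0).mp (List.isPrefixOf_iff_prefix.mp (by simpa using h))
        simpa using this
      · left
        constructor
        · simp [h]
        · intro j hj
          interval_cases j
          intro hg
          exact h (List.isPrefixOf_iff_prefix.mpr (by simpa using (pv_singleton_prefix_drop c0 cs 0).mpr hg))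
  | succ m ih =>
      rw [PySem.Chars.rfind.go]
      by_cases h : [c0].isPrefixOf (cs.drop (m + 1))
      · right
        refine ⟨m + 1, by simp [h], le_refl _, ?_, by omega⟩
        exact (pv_singleton_prefix_drop c0 cs (m + 1)).mp (List.isPrefixOf_iff_prefix.mp h)
      · have hnot : cs[m + 1]? ≠ some c0 := by
          intro hg
          exact h (List.isPrefixOf_iff_prefix.mpr ((pv_singleton_prefix_drop c0 cs (m + 1)).mpr hg))
        rcases ih with ⟨he, hall⟩ | ⟨l, he, hl, hget, hmax⟩
        · left
          refine ⟨by simp [h, he], ?_⟩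
          intro j hj
          rcases Nat.lt_or_ge j (m + 1) with hlt | hge
          · exact hall j (by omega)
          · have : j = m + 1 := by omega
            subst this; exact hnot
        · right
          refine ⟨l, by simp [h, he], by omega, hget, ?_⟩
          intro j hlj hj
          rcases Nat.lt_or_ge j (m + 1) with hlt | hge
          · exact hmax j hlj (by omega)
          · have : j = m + 1 := by omega
            subst this; exact hnot

-- Chars.rfind on a singleton pattern returns the greatest index holding c0
theorem pv_rfind_singleton (cs : List Char) (c0 : Char) (h : c0 ∈ cs) :
    ∃ l : Nat, PySem.Chars.rfind cs [c0] = (l : Int) ∧ cs[l]? = some c0 ∧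
      ∀ j, l < j → cs[j]? ≠ some c0 := by
  obtain ⟨j, hj⟩ := List.mem_iff_getElem?.mp h
  rcases pv_rgo_spec cs c0 cs.length with ⟨-, hall⟩ | ⟨l, he, -, hget, hmax⟩
  · obtain ⟨hlt, -⟩ := List.getElem?_eq_some_iff.mp hj
    exact absurd hj (hall j (by omega))
  · refine ⟨l, by rw [PySem.Chars.rfind]; exact he, hget, ?_⟩
    intro k hk
    rcases Nat.lt_or_ge k (cs.length + 1) with hlt | hge
    · rcases Nat.lt_or_ge k cs.length with h2 | h2
      · exact hmax k hk (by omega)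
      · intro hg
        obtain ⟨hlt, -⟩ := List.getElem?_eq_some_iff.mp hg
        omega
    · intro hg
      obtain ⟨hlt, -⟩ := List.getElem?_eq_some_iff.mp hg
      omega

-- A's populating loop: stays empty if the gate never fires, else a single-entry dict
theorem pv_afold (s ch : String) (v : List Int) (L : List Int) (d : PySem.Dict String (List Int))
    (hd : d = PySem.Dict.empty ∨ d = PySem.Dict.empty.insert ch v) :
    L.foldl
      (fun d i =>
        match PySem.Str.pyGet? s i with
        | some c => if String.ofList [c] == ch then d.insert (String.ofList [c]) v else d
        | none => d) d
    = if L.any (fun i =>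
        match PySem.Str.pyGet? s i with
        | some c => String.ofList [c] == ch
        | none => false) then PySem.Dict.empty.insert ch v else d := by
  induction L generalizing d with
  | nil => simp
  | cons i L ih =>
      rcases hg : PySem.Str.pyGet? s i with - | c
      · simp only [List.foldl_cons, List.any_cons, hg]
        exact ih d hd
      · by_cases hb : String.ofList [c] == ch
        · have hkey : String.ofList [c] = ch := eq_of_beq hb
          have hins : d.insert (String.ofList [c]) v = PySem.Dict.empty.insert ch v := by
            rcases hd with rfl | rfl
            · rw [hkey]
            · rw [hkey, PySem.Dict.insert_insert_self]
          simp only [List.foldl_cons, List.any_cons, hg, hb, if_true, Bool.true_or, hins,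
            ih _ (Or.inr rfl)]
          split <;> rfl
        · simp only [List.foldl_cons, List.any_cons, hg, hb, Bool.false_or]
          exact ih d hd

-- B's loop leaves the state unchanged when the gate never fires
theorem pv_bfold_none (ch : String) (cs : List Char)
    (h : ∀ c ∈ cs, (String.ofList [c] == ch) = false) (k : Int) (st : Option Int × Option Int) :
    (PySem.List.enumerate cs k).foldl
      (fun st ic =>
        if String.ofList [ic.2] == ch then
          ((match st.1 with | none => some ic.1 | some f => some f), some ic.1)
        else st) st = st := by
  induction cs generalizing k st with
  | nil => simp [PySem.List.enumerate_nil]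
  | cons c cs ih =>
      rw [PySem.List.enumerate_cons, List.foldl_cons]
      simp only [h c List.mem_cons_self]
      exact ih (fun c' hc' => h c' (List.mem_cons_of_mem _ hc')) _ _

-- B's loop from the empty state: ends with the least and greatest matching index
theorem pv_bfold (ch : String) (c0 : Char) (hch : ch.toList = [c0]) (cs : List Char) :
    (c0 ∉ cs ∧ (PySem.List.enumerate cs 0).foldl
      (fun st ic =>
        if String.ofList [ic.2] == ch then
          ((match st.1 with | none => some ic.1 | some f => some f), some ic.1)
        else st) ((none : Option Int), (none : Option Int)) = (none, none)) ∨
    (∃ f l : Nat, (PySem.List.enumerate cs 0).foldl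
      (fun st ic =>
        if String.ofList [ic.2] == ch then
          ((match st.1 with | none => some ic.1 | some f => some f), some ic.1)
        else st) ((none : Option Int), (none : Option Int)) = (some (f : Int), some (l : Int)) ∧
      cs[f]? = some c0 ∧ (∀ j < f, cs[j]? ≠ some c0) ∧
      cs[l]? = some c0 ∧ ∀ j, l < j → cs[j]? ≠ some c0) := by
  induction cs using List.reverseRecOn with
  | nil => left; simp [PySem.List.enumerate_nil]
  | append_singleton cs c ih =>
      have hsplit : PySem.List.enumerate (cs ++ [c]) 0
          = PySem.List.enumerate cs 0 ++ [((cs.length : Int), c)] := by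
        rw [PySem.List.enumerate_append, PySem.List.enumerate_cons, PySem.List.enumerate_nil]
        norm_num
      rw [hsplit, List.foldl_append]
      by_cases hc : c = c0
      · subst hc
        rcases ih with ⟨hmem, heq⟩ | ⟨f, l, heq, hgf, hminf, hgl, hmaxl⟩
        · right
          have hcheq : String.ofList [c] = ch := by rw [← hch]; simp
          refine ⟨cs.length, cs.length, ?_, ?_, ?_, ?_, ?_⟩
          · rw [heq]; simp [hcheq]
          · simp
          · intro j hj hg
            exact hmem (List.mem_of_getElem? (by rwa [List.getElem?_append_left hj] at hg))
          · simp
          · intro j hj hg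
            obtain ⟨hlt, -⟩ := List.getElem?_eq_some_iff.mp hg
            simp at hlt; omega
        · right
          have hcheq : String.ofList [c] = ch := by rw [← hch]; simp
          refine ⟨f, cs.length, ?_, ?_, ?_, ?_, ?_⟩
          · rw [heq]; simp [hcheq]
          · obtain ⟨hf, -⟩ := List.getElem?_eq_some_iff.mp hgf
            rw [List.getElem?_append_left hf]; exact hgf
          · intro j hj hg
            obtain ⟨hf, -⟩ := List.getElem?_eq_some_iff.mp hgf
            exact hminf j hj (by rwa [List.getElem?_append_left (by omega)] at hg)
          · simp
          · intro j hj hg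
            obtain ⟨hlt, -⟩ := List.getElem?_eq_some_iff.mp hg
            simp at hlt; omega
      · have hgate : (String.ofList [c] == ch) = false := by
          rw [pv_gate_iff ch c0 c hch]; simp [hc]
        have hne : ¬ String.ofList [c] = ch := by simpa using hgate
        rcases ih with ⟨hmem, heq⟩ | ⟨f, l, heq, hgf, hminf, hgl, hmaxl⟩
        · left
          constructor
          · intro hm
            rcases List.mem_append.mp hm with h1 | h1
            · exact hmem h1
            · simp at h1; exact hc h1.symm
          · rw [heq]; simp [hne]
        · right
          refine ⟨f, l, ?_, ?_, ?_, ?_, ?_⟩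
          · rw [heq]; simp [hne]
          · obtain ⟨hf, -⟩ := List.getElem?_eq_some_iff.mp hgf
            rw [List.getElem?_append_left hf]; exact hgf
          · intro j hj hg
            obtain ⟨hf, -⟩ := List.getElem?_eq_some_iff.mp hgf
            rcases Nat.lt_or_ge j cs.length with h2 | h2
            · exact hminf j hj (by rwa [List.getElem?_append_left h2] at hg)
            · obtain ⟨h3, h4⟩ := List.getElem?_eq_some_iff.mp hg
              simp at h3
              have hj' : j = cs.length := by omega
              subst hj'
              simp at h4
              exact hc h4
          · obtain ⟨hl, -⟩ := List.getElem?_eq_some_iff.mp hgl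
            rw [List.getElem?_append_left hl]; exact hgl
          · intro j hj hg
            rcases Nat.lt_or_ge j cs.length with h2 | h2
            · exact hmaxl j hj (by rwa [List.getElem?_append_left h2] at hg)
            · obtain ⟨h3, h4⟩ := List.getElem?_eq_some_iff.mp hg
              simp at h3
              have hj' : j = cs.length := by omega
              subst hj'
              simp at h4
              exact hc h4

-- ===== VERDICT (by name: the statement is the Claim_ definition above) =====
theorem find_first_and_last_occurrence_with_alphabets_spec : Claim_equal_find_first_and_last_occurrence_with_alphabets := by
  intro s ch _
  unfold Spec_find_first_and_last_occurrence_with_alphabets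
  by_cases hex : ∃ c0, ch.toList = [c0] ∧ c0 ∈ s.toList
  · obtain ⟨c0, hch, hmem⟩ := hex
    have hcheq : String.ofList [c0] = ch := by rw [← hch]; simp
    rcases pv_bfold ch c0 hch s.toList with ⟨hm, -⟩ | ⟨f, l, heq, hgf, hminf, hgl, hmaxl⟩
    · exact absurd hmem hm
    · obtain ⟨hflt, -⟩ := List.getElem?_eq_some_iff.mp hgf
      have hB : find_first_and_last_occurrence_with_alphabets_alt s ch
          = [(ch, [(f : Int), (l : Int)])] := by
        unfold find_first_and_last_occurrence_with_alphabets_alt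
        dsimp only
        rw [heq]
      have hany : ((PySem.List.pyRange 0 (PySem.Str.len s) 1).any (fun i =>
          match PySem.Str.pyGet? s i with
          | some c => String.ofList [c] == ch
          | none => false)) = true := by
        rw [List.any_eq_true]
        refine ⟨(f : Int), ?_, ?_⟩
        · rw [PySem.List.mem_pyRange_one]
          constructor
          · positivity
          · simp only [PySem.Str.len]
            exact_mod_cast hflt
        · rw [PySem.Str.pyGet?_natCast, hgf]
          simp [hcheq]
      have hA : find_first_and_last_occurrence_with_alphabets s ch
          = [(ch, [PySem.Str.find s ch, PySem.Str.rfind s ch])] := by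
        unfold find_first_and_last_occurrence_with_alphabets
        dsimp only
        rw [pv_afold s ch _ _ _ (Or.inl rfl), if_pos hany]
        rw [PySem.Dict.items_insert_of_not_contains _ _ (PySem.Dict.contains_empty ch)]
        rfl
      rw [hA, hB]
      obtain ⟨f', he', hg', hmin'⟩ := pv_find_singleton s.toList c0 hmem
      obtain ⟨l', hel', hgl', hmax'⟩ := pv_rfind_singleton s.toList c0 hmem
      have hff : f' = f := by
        rcases Nat.lt_trichotomy f' f with h | h | h
        · exact absurd hg' (hminf f' h)
        · exact h
        · exact absurd hgf (hmin' f h)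
      have hll : l' = l := by
        rcases Nat.lt_trichotomy l' l with h | h | h
        · exact absurd hgl (hmax' l h)
        · exact h
        · exact absurd hgl' (hmaxl l' h)
      rw [PySem.Str.find_eq, PySem.Str.rfind_eq, hch, he', hel', hff, hll]
  · have hnone : ∀ c ∈ s.toList, (String.ofList [c] == ch) = false := by
      intro c hcmem
      cases hb : (String.ofList [c] == ch)
      · rfl
      · exfalso
        have hbe := eq_of_beq hb
        exact hex ⟨c, by rw [← hbe]; simp, hcmem⟩
    have hB : find_first_and_last_occurrence_with_alphabets_alt s ch = [] := by
      unfold find_first_and_last_occurrence_with_alphabets_alt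
      dsimp only
      rw [pv_bfold_none ch s.toList hnone 0 (none, none)]
    have hany : ((PySem.List.pyRange 0 (PySem.Str.len s) 1).any (fun i =>
        match PySem.Str.pyGet? s i with
        | some c => String.ofList [c] == ch
        | none => false)) = false := by
      rw [List.any_eq_false]
      intro i hi
      rw [PySem.List.mem_pyRange_one] at hi
      have hi0 : i = ((i.toNat : Nat) : Int) := by omega
      rcases hg : PySem.Str.pyGet? s i with - | c
      · simp
      · simp only []
        rw [hi0, PySem.Str.pyGet?_natCast] at hg
        simp [hnone c (List.mem_of_getElem? hg)]
    have hA : find_first_and_last_occurrence_with_alphabets s ch = [] := by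
      unfold find_first_and_last_occurrence_with_alphabets
      dsimp only
      rw [pv_afold s ch _ _ _ (Or.inl rfl), if_neg (by rw [hany]; simp)]
      rfl
    rw [hA, hB]
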